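-- pv_equiv track=rewrite | github.com/williamLyh/InstructDiscourse | evaluation_utils.py | remove_substring_ingr
-- ===== SOURCE A (Python) =====
-- def remove_substring_ingr(ingr_list):
--     ingredient_list = sorted(ingr_list,key=len)
--     ingr_to_remove = []
--     for i in range(len(ingr_list)):
--         for j in range(i+1, len(ingr_list)):
--             if ingr_list[i] in ingr_list[j]:
--                 ingr_to_remove.append(ingr_list[i])
--                 break
--
--     for ingr in ingr_to_remove:
--         ingr_list.remove(ingr)
--     return ingr_list
-- ===== SOURCE B (Python) =====
-- def remove_substring_ingr(ingr_list):
--     kept = []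
--     later = []
--     for s in reversed(ingr_list):
--         if not any(s in t for t in later):
--             kept.append(s)
--         later.append(s)
--     kept.reverse()
--     ingr_list[:] = kept
--     return ingr_list
-- ===== Notes on version B (the rewrite author's own statement) =====
-- stated objective: alternative
-- what changed: Replaces A's three phases (a dead sort, an index-based double loop collecting strings to remove, then repeated list.remove passes) by a single right-to-left traversal keeping an accumulator of later strings and building the kept list back-to-front; no separate removal pass remains.
import Mathlib
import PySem

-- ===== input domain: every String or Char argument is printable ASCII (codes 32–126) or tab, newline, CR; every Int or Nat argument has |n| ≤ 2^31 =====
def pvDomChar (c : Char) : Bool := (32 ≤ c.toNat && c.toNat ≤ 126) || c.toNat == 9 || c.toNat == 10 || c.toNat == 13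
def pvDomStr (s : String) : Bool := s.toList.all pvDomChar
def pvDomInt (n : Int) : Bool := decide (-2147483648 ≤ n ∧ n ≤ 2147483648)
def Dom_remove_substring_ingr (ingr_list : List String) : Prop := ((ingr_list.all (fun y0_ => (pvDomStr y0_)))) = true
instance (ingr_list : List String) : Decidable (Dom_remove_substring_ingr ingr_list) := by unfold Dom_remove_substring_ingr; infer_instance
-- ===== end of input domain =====

-- B replaces A's collect-then-remove double pass by one right-to-left pass with an
-- accumulator of later strings, building the kept list back-to-front (objective: alternative,
-- no speed claim). Both A and B mutate ingr_list in place; the equivalence proved here is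
-- about the return value (which equals the mutated list in both).

-- ===== PORT A =====
-- inner loop 'for j in range(i+1, len(ingr_list)): if ingr_list[i] in ingr_list[j]: append; break'
-- (the 'none' branch of pyGet? is unreachable: j is always in range)
def pvAInner (l : List String) (s : String) : List Int → Bool
  | [] => false
  | j :: js =>
    match PySem.List.pyGet? l j with
    | some t => if PySem.Str.isIn s t then true else pvAInner l s js
    | none => false

def remove_substring_ingr (ingr_list : List String) : List String :=
  let _ingredient_list := PySem.List.sorted ingr_list (fun s => PySem.Str.len s) false
  let ingr_to_remove :=
    (PySem.List.pyRange 0 (ingr_list.length : Int) 1).foldl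
      (fun acc i =>
        match PySem.List.pyGet? ingr_list i with
        | some s =>
          if pvAInner ingr_list s (PySem.List.pyRange (i + 1) (ingr_list.length : Int) 1)
          then acc ++ [s] else acc
        | none => acc) []
  -- 'ingr_list.remove(ingr)': remove? never returns none here (every flagged value is present)
  ingr_to_remove.foldl (fun cur x => (PySem.List.remove? cur x).getD cur) ingr_list

-- ===== PORT B =====
def pvBStep (st : List String × List String) (s : String) : List String × List String :=
  ((if st.2.any (fun t => PySem.Str.isIn s t) then st.1 else st.1 ++ [s]), st.2 ++ [s])

def remove_substring_ingr_alt (ingr_list : List String) : List String :=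
  let p := ingr_list.reverse.foldl pvBStep ([], [])
  p.1.reverse

-- ===== PRECONDITION & SPEC =====
def Spec_remove_substring_ingr (ingr_list : List String) (out : List String) : Prop := out = remove_substring_ingr_alt ingr_list
instance (ingr_list : List String) (out : List String) : Decidable (Spec_remove_substring_ingr ingr_list out) := by unfold Spec_remove_substring_ingr; infer_instance

-- ===== CLAIM (what is proved, stated in full; the proofs are below) =====
def Claim_equal_remove_substring_ingr : Prop := ∀ (ingr_list : List String), Dom_remove_substring_ingr ingr_list → Spec_remove_substring_ingr ingr_list (remove_substring_ingr ingr_list)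

-- ===== LEMMAS AND PROOFS =====

-- reference function: keep each element that is not a substring of a later element
def pvKeep : List String → List String
  | [] => []
  | s :: rest => if rest.any (fun t => PySem.Str.isIn s t) then pvKeep rest else s :: pvKeep rest

-- elements A flags for removal
def pvFlag : List String → List String
  | [] => []
  | s :: rest => if rest.any (fun t => PySem.Str.isIn s t) then s :: pvFlag rest else pvFlag rest

theorem pvAInner_eq (l : List String) (s : String) :
    ∀ m k, l.length - k ≤ m →
      pvAInner l s (PySem.List.pyRange (k : Int) (l.length : Int) 1)
        = (l.drop k).any (fun t => PySem.Str.isIn s t) := by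
  intro m
  induction m with
  | zero =>
    intro k hk
    have hle : l.length ≤ k := by omega
    rw [PySem.List.pyRange_one_eq_nil (by exact_mod_cast hle)]
    rw [List.drop_eq_nil_of_le hle]
    rfl
  | succ m ih =>
    intro k hk
    by_cases h : k < l.length
    · rw [PySem.List.pyRange_one_cons (by exact_mod_cast h)]
      have hget : PySem.List.pyGet? l (k : Int) = some l[k] := by
        simp [PySem.List.pyGet?_natCast, List.getElem?_eq_getElem h]
      have hdrop : l.drop k = l[k] :: l.drop (k + 1) := by
        rw [List.drop_eq_getElem_cons h]
      have hcast : (k : Int) + 1 = ((k + 1 : Nat) : Int) := by push_cast; ring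
      show pvAInner l s ((k : Int) :: PySem.List.pyRange ((k : Int) + 1) (l.length : Int) 1) = _
      rw [pvAInner, hget, hcast, ih (k + 1) (by omega), hdrop]
      simp only [List.any_cons]
      cases hc : PySem.Str.isIn s l[k] <;> simp
    · have hle : l.length ≤ k := by omega
      rw [PySem.List.pyRange_one_eq_nil (by exact_mod_cast hle), List.drop_eq_nil_of_le hle]
      rfl

theorem pvFlag_eq (l : List String) :
    ∀ m k acc, l.length - k ≤ m →
      (PySem.List.pyRange (k : Int) (l.length : Int) 1).foldl
        (fun acc i =>
          match PySem.List.pyGet? l i with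
          | some s =>
            if pvAInner l s (PySem.List.pyRange (i + 1) (l.length : Int) 1)
            then acc ++ [s] else acc
          | none => acc) acc
        = acc ++ pvFlag (l.drop k) := by
  intro m
  induction m with
  | zero =>
    intro k acc hk
    have hle : l.length ≤ k := by omega
    rw [PySem.List.pyRange_one_eq_nil (by exact_mod_cast hle), List.drop_eq_nil_of_le hle]
    simp [pvFlag]
  | succ m ih
  =>
    intro k acc hk
    by_cases h : k < l.length
    · rw [PySem.List.pyRange_one_cons (by exact_mod_cast h)]
      have hget : PySem.List.pyGet? l (k : Int) = some l[k] := by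
        simp [PySem.List.pyGet?_natCast, List.getElem?_eq_getElem h]
      have hcast : (k : Int) + 1 = ((k + 1 : Nat) : Int) := by push_cast; ring
      have hdrop : l.drop k = l[k] :: l.drop (k + 1) := by
        rw [List.drop_eq_getElem_cons h]
      rw [List.foldl_cons]
      simp only [hget]
      rw [hcast, pvAInner_eq l l[k] ((l.length - (k+1))) (k+1) (by omega)]
      rw [ih (k + 1) _ (by omega), hdrop, pvFlag]
      cases hc : (l.drop (k + 1)).any (fun t => PySem.Str.isIn l[k] t) <;> simp
    · have hle : l.length ≤ k := by omega
      rw [PySem.List.pyRange_one_eq_nil (by exact_mod_cast hle), List.drop_eq_nil_of_le hle]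
      simp [pvFlag]

theorem pv_mem_flag {x : String} : ∀ {l : List String}, x ∈ pvFlag l → x ∈ l := by
  intro l
  induction l with
  | nil => simp [pvFlag]
  | cons s rest ih =>
    simp only [pvFlag]
    split_ifs with hc
    · intro hx
      rcases List.mem_cons.mp hx with h | h
      · exact h ▸ List.mem_cons_self
      · exact List.mem_cons_of_mem _ (ih h)
    · intro hx; exact List.mem_cons_of_mem _ (ih hx)

theorem pv_removeAll_cons (s : String) :
    ∀ (ts l : List String), (∀ x ∈ ts, x ≠ s) →
      ts.foldl (fun cur x => (PySem.List.remove? cur x).getD cur) (s :: l)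
        = s :: ts.foldl (fun cur x => (PySem.List.remove? cur x).getD cur) l := by
  intro ts
  induction ts with
  | nil => intro l _; rfl
  | cons x ts ih =>
    intro l hne
    have hxs : s ≠ x := fun h => (hne x List.mem_cons_self) h.symm
    rw [List.foldl_cons, List.foldl_cons]
    rw [PySem.List.remove?_cons_of_ne l hxs]
    cases hrem : PySem.List.remove? l x with
    | none =>
      simp only [Option.map_none, Option.getD_none]
      exact ih l (fun y hy => hne y (List.mem_cons_of_mem _ hy))
    | some l' =>
      simp only [Option.map_some, Option.getD_some]
      exact ih l' (fun y hy => hne y (List.mem_cons_of_mem _ hy))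

theorem pv_isIn_self (s : String) : PySem.Str.isIn s s = true := by
  rw [PySem.Str.isIn_iff_infix]

theorem pv_removeAll_flag : ∀ (l : List String),
    (pvFlag l).foldl (fun cur x => (PySem.List.remove? cur x).getD cur) l = pvKeep l := by
  intro l
  induction l with
  | nil => rfl
  | cons s rest ih =>
    cases hc : rest.any (fun t => PySem.Str.isIn s t) with
    | true =>
      rw [pvFlag, pvKeep, hc, if_pos rfl, if_pos rfl]
      rw [List.foldl_cons, PySem.List.remove?_cons_self, Option.getD_some]
      exact ih
    | false =>
      rw [pvFlag, pvKeep, hc, if_neg (by simp), if_neg (by simp)]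
      rw [pv_removeAll_cons s (pvFlag rest) rest ?_, ih]
      intro x hx hxeq
      have hxmem : x ∈ rest := pv_mem_flag hx
      have hany : rest.any (fun t => PySem.Str.isIn s t) = true :=
        List.any_eq_true.mpr ⟨x, hxmem, by rw [hxeq]; exact pv_isIn_self s⟩
      rw [hc] at hany; exact Bool.false_ne_true hany

theorem pvA_eq_keep (l : List String) : remove_substring_ingr l = pvKeep l := by
  unfold remove_substring_ingr
  have h0 : ((0 : Nat) : Int) = (0 : Int) := rfl
  rw [← h0, pvFlag_eq l l.length 0 [] (by omega)]
  simp only [List.drop_zero, List.nil_append]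
  exact pv_removeAll_flag l

theorem pvB_inv (l : List String) :
    (l.foldr (fun s st => pvBStep st s) ([], [])).1.reverse = pvKeep l ∧
    (l.foldr (fun s st => pvBStep st s) ([], [])).2 = l.reverse := by
  induction l with
  | nil => exact ⟨rfl, rfl⟩
  | cons s rest ih =>
    obtain ⟨ih1, ih2⟩ := ih
    rw [List.foldr_cons]
    constructor
    · show (pvBStep _ s).1.reverse = _
      rw [pvBStep]
      simp only [ih2]
      have hany : rest.reverse.any (fun t => PySem.Str.isIn s t)
          = rest.any (fun t => PySem.Str.isIn s t) := List.any_reverse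
      rw [hany, pvKeep]
      cases hc : rest.any (fun t => PySem.Str.isIn s t) <;> simp [ih1]
    · show (pvBStep _ s).2 = _
      rw [pvBStep]
      simp [ih2]

theorem pvB_eq_keep (l : List String) : remove_substring_ingr_alt l = pvKeep l := by
  unfold remove_substring_ingr_alt
  rw [List.foldl_reverse]
  exact (pvB_inv l).1

-- ===== VERDICT (by name: the statement is the Claim_ definition above) =====
theorem remove_substring_ingr_spec : Claim_equal_remove_substring_ingr := by
  intro l _
  show remove_substring_ingr l = remove_substring_ingr_alt l
  rw [pvA_eq_keep, pvB_eq_keep]
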